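-- pv_equiv track=rewrite | github.com/CogNLP/CogAGENT | cogagent/toolkits/kg_grounded_dialogue_toolkit.py | calc_banned_bad_words_ids
-- ===== SOURCE A (Python) =====
-- from typing import Dict, Iterable, Optional, List
--
-- def calc_banned_bad_words_ids(prev_input_ids: Iterable[int], bad_words_ids: Iterable[int]) -> Iterable[int]:
--     banned_tokens = []
--
--     def _tokens_match(prev_tokens, tokens):
--         if len(tokens) == 0:
--             # if bad word tokens is just one token always ban it
--             return True
--         if len(tokens) > len(prev_tokens):
--             # if bad word tokens are longer than prev tokens they can't be equal
--             return False
--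
--         if prev_tokens[-len(tokens) :] == tokens:
--             # if tokens match
--             return True
--         else:
--             return False
--
--     for prev_input_ids_slice in prev_input_ids:
--         banned_tokens_slice = []
--
--         for banned_token_seq in bad_words_ids:
--             assert len(banned_token_seq) > 0, "Banned words token sequences {} cannot have an empty list".format(
--                 bad_words_ids
--             )
--
--             if _tokens_match(prev_input_ids_slice, banned_token_seq[:-1]) is False:
--                 # if tokens do not match continue
--                 continue
--
--             banned_tokens_slice.append(banned_token_seq[-1])
--
--         banned_tokens.append(banned_tokens_slice)
--
--     return banned_tokens
-- ===== SOURCE B (Python) =====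
-- def calc_banned_bad_words_ids(prev_input_ids, bad_words_ids):
--     # Hash-index: map each bad word's prefix (all tokens but the last) to the
--     # (original index, last token) pairs carrying it, and record the distinct
--     # prefix lengths.  Per slice, one hash lookup per distinct length replaces
--     # the scan over all bad words; sorting on the index restores A's order.
--     table = {}
--     lengths = set()
--     for idx, seq in enumerate(bad_words_ids):
--         pref = tuple(seq[:-1])
--         table.setdefault(pref, []).append((idx, seq[-1]))
--         lengths.add(len(pref))
--     banned_tokens = []
--     for s in prev_input_ids:
--         hits = []
--         for L in lengths:
--             if L <= len(s):
--                 hits.extend(table.get(tuple(s[len(s) - L:]), []))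
--         hits.sort(key=lambda p: p[0])
--         banned_tokens.append([last for _, last in hits])
--     return banned_tokens
-- ===== Notes on version B (the rewrite author's own statement) =====
-- stated objective: faster
-- what changed: Replaces the per-slice scan over all bad words by a prefix hash index built once (prefix tuple -> (index, last) pairs) plus the set of distinct prefix lengths; each slice does one dict lookup per distinct length and a sort on the original indices restores A's order.
-- outside the precondition, e.g. on calc_banned_bad_words_ids([], [[1], []]): A returns [], B raises IndexError
import Mathlib
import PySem

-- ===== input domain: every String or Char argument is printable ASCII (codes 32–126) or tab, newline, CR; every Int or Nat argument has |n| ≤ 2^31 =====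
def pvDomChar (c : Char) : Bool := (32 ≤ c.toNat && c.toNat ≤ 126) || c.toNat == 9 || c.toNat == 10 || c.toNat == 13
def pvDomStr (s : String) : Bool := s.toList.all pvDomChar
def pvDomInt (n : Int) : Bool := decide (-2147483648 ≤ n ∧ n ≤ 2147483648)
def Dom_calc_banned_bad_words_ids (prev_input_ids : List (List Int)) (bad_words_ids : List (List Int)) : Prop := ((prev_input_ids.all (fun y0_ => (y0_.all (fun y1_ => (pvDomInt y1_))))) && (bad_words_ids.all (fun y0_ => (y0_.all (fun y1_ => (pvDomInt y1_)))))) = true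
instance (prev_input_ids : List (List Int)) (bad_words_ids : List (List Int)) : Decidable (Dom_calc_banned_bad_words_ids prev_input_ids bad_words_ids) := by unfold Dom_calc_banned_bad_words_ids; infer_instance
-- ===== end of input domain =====

-- B replaces A's per-slice scan over all bad words by a prefix hash index built once plus
-- per-slice suffix lookups per distinct prefix length, sorting hits by original index.


-- ===== PORT A =====
-- helper _tokens_match of A
def pvTokensMatch (prev_tokens tokens : List Int) : Bool :=
  if tokens.length = 0 then true
  else if tokens.length > prev_tokens.length then false
  else if PySem.List.slice prev_tokens (some (-(tokens.length : Int))) none == tokens then true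
  else false

def calc_banned_bad_words_ids (prev_input_ids : List (List Int)) (bad_words_ids : List (List Int)) : List (List Int) :=
  prev_input_ids.foldl (fun banned_tokens prev_input_ids_slice =>
    let banned_tokens_slice := bad_words_ids.foldl (fun bs banned_token_seq =>
      if pvTokensMatch prev_input_ids_slice (PySem.List.slice banned_token_seq none (some (-1))) = false then bs
      else bs ++ [PySem.List.pyGetD banned_token_seq (-1) 0]) []
    banned_tokens ++ [banned_tokens_slice]) []

-- ===== PORT B =====
-- The Python iterates over the set 'lengths'; the final slice value does not depend on that
-- iteration order (hits are sorted by the distinct original indices before use).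
def calc_banned_bad_words_ids_alt (prev_input_ids : List (List Int)) (bad_words_ids : List (List Int)) : List (List Int) :=
  let st := (PySem.List.enumerate bad_words_ids 0).foldl
      (fun (st : PySem.Dict (List Int) (List (Int × Int)) × PySem.Set Int) p =>
        let pref := PySem.List.slice p.2 none (some (-1))
        (st.1.modify pref [] (· ++ [(p.1, PySem.List.pyGetD p.2 (-1) 0)]),
         PySem.Set.add st.2 (PySem.List.len pref)))
      (PySem.Dict.empty, PySem.Set.empty)
  prev_input_ids.foldl (fun banned_tokens s =>
    let hits := st.2.foldl (fun h L =>
        if L ≤ PySem.List.len s then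
          h ++ st.1.getD (PySem.List.slice s (some (PySem.List.len s - L)) none) []
        else h) []
    banned_tokens ++ [(PySem.List.sorted hits (fun p => p.1) false).map (·.2)]) []

-- ===== PRECONDITION & SPEC =====
-- Pre_ excludes inputs with an empty bad-word sequence: there Python A raises AssertionError (except when
-- prev_input_ids is empty, where A's loop body never runs and it returns [], while B naturally raises IndexError).
def Pre_calc_banned_bad_words_ids (prev_input_ids : List (List Int)) (bad_words_ids : List (List Int)) : Prop :=
  ∀ w ∈ bad_words_ids, w ≠ []
instance (prev_input_ids : List (List Int)) (bad_words_ids : List (List Int)) : Decidable (Pre_calc_banned_bad_words_ids prev_input_ids bad_words_ids) := by unfold Pre_calc_banned_bad_words_ids; infer_instance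

def pvWitness_calc_banned_bad_words_ids : List (List Int) × List (List Int) := ([[1, 2], [3]], [[2, 4], [5]])

def Spec_calc_banned_bad_words_ids (prev_input_ids : List (List Int)) (bad_words_ids : List (List Int)) (out : List (List Int)) : Prop := out = calc_banned_bad_words_ids_alt prev_input_ids bad_words_ids
instance (prev_input_ids : List (List Int)) (bad_words_ids : List (List Int)) (out : List (List Int)) : Decidable (Spec_calc_banned_bad_words_ids prev_input_ids bad_words_ids out) := by unfold Spec_calc_banned_bad_words_ids; infer_instance

-- ===== CLAIM (what is proved, stated in full; the proofs are below) =====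
def Claim_equal_calc_banned_bad_words_ids : Prop := ∀ (prev_input_ids : List (List Int)) (bad_words_ids : List (List Int)), Dom_calc_banned_bad_words_ids prev_input_ids bad_words_ids → Pre_calc_banned_bad_words_ids prev_input_ids bad_words_ids → Spec_calc_banned_bad_words_ids prev_input_ids bad_words_ids (calc_banned_bad_words_ids prev_input_ids bad_words_ids)

-- ===== LEMMAS AND PROOFS =====

-- A's three-branch helper equals the single clamped-suffix comparison (Nat subtraction clamps at 0).
lemma pvTokensMatch_eq_drop (s tokens : List Int) :
    pvTokensMatch s tokens = (s.drop (s.length - tokens.length) == tokens) := by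
  unfold pvTokensMatch
  by_cases h0 : tokens.length = 0
  · simp [List.eq_nil_of_length_eq_zero h0]
  · by_cases hgt : tokens.length > s.length
    · have hd : s.length - tokens.length = 0 := by omega
      simp only [h0, hgt, if_true, if_false, hd, List.drop_zero]
      have : ¬ (s == tokens) = true := by
        intro hbeq
        have := eq_of_beq hbeq
        subst this; omega
      simp [this]
    · have hle : tokens.length ≤ s.length := by omega
      rw [PySem.List.slice_from_neg_natCast s tokens.length (by omega)]
      by_cases hd : List.drop (s.length - tokens.length) s = tokens <;> simp [h0, hgt, hd]

-- partitioning a filter over the distinct key values its members take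
lemma filter_perm_flatMap {α κ : Type} [DecidableEq κ] (l : List α) (p : α → Bool) (key : α → κ) :
    ∀ (ls : List κ), ls.Nodup → (∀ x ∈ l, p x = true → key x ∈ ls) →
    (l.filter p).Perm (ls.flatMap (fun L => l.filter (fun x => p x && decide (key x = L)))) := by
  intro ls
  induction ls generalizing p with
  | nil =>
      intro _ hmem
      have : l.filter p = [] := by
        rw [List.filter_eq_nil_iff]
        intro x hx hpx
        exact absurd (hmem x hx hpx) (List.not_mem_nil)
      simp [this]
  | cons L rest ih =>
      intro hnd hmem
      have hLrest : L ∉ rest := by simpa using (List.nodup_cons.mp hnd).1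
      have hperm := (List.filter_append_perm (fun x => decide (key x = L)) (l.filter p)).symm
      rw [List.filter_filter, List.filter_filter] at hperm
      have e1 : l.filter (fun a => decide (key a = L) && p a)
          = l.filter (fun x => p x && decide (key x = L)) := by
        apply List.filter_congr; intro x _; rw [Bool.and_comm]
      have e2 : l.filter (fun a => !decide (key a = L) && p a)
          = l.filter (fun x => p x && !decide (key x = L)) := by
        apply List.filter_congr; intro x _; rw [Bool.and_comm]
      rw [e1, e2] at hperm
      have hrest := ih (p := fun x => p x && !decide (key x = L)) (List.nodup_cons.mp hnd).2
        (by
          intro x hx hpx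
          simp only [Bool.and_eq_true, Bool.not_eq_true', decide_eq_false_iff_not] at hpx
          have := hmem x hx hpx.1
          simp only [List.mem_cons] at this
          tauto)
      have hgr : ∀ M ∈ rest,
          l.filter (fun x => (p x && !decide (key x = L)) && decide (key x = M))
            = l.filter (fun x => p x && decide (key x = M)) := by
        intro M hM
        apply List.filter_congr
        intro x _
        by_cases hk : key x = M
        · have hne : ¬ M = L := by rintro rfl; exact hLrest hM
          simp [hk, hne]
        · simp [hk]
      rw [List.flatMap_cons]
      refine hperm.trans (List.Perm.append_left _ ?_)
      refine hrest.trans ?_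
      exact List.Perm.of_eq (List.flatMap_congr hgr)

-- filtering/projecting enumerate through its payload
lemma enumerate_filter_map_snd (bad : List (List Int)) (c : List Int → Bool) (f : List Int → Int) :
    ∀ k : Int, ((PySem.List.enumerate bad k).filter (fun p => c p.2)).map (fun p => f p.2)
      = (bad.filter c).map f := by
  induction bad with
  | nil => intro k; simp [PySem.List.enumerate_nil]
  | cons x xs ih =>
      intro k
      rw [PySem.List.enumerate_cons]
      by_cases hc : c x = true
      · simp only [List.filter_cons, hc, if_true, List.map_cons, ih]
      · have hcf : c x = false := by simpa using hc
        simp only [List.filter_cons, hcf, Bool.false_eq_true, if_false]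
        exact ih (k + 1)

-- the per-length lookup group equals the keyed filter of the prefix/payload pairs
lemma group_eq (s : List Int) (pl : List (List Int × (Int × Int))) (n : Nat) :
    (if (n : Int) ≤ (s.length : Int) then
        (pl.filter (fun q => q.1 == s.drop (s.length - n))).map (·.2)
      else []) =
    (pl.filter (fun q => (s.drop (s.length - q.1.length) == q.1)
        && decide ((q.1.length : Int) = (n : Int)))).map (·.2) := by
  by_cases hn : n ≤ s.length
  · have h1 : ((n : Int) ≤ (s.length : Int)) := by exact_mod_cast hn
    rw [if_pos h1]
    congr 1
    apply List.filter_congr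
    intro q _
    by_cases he : q.1 = s.drop (s.length - n)
    · have hlen : q.1.length = n := by
        rw [he, List.length_drop]; omega
      simp only [hlen]
      rw [he]
      simp
    · by_cases hl : q.1.length = n
      · have hne : ¬ (s.drop (s.length - n) = q.1) := fun h => he h.symm
        simp [hl, he, hne]
      · have hne : ¬ ((q.1.length : Int) = (n : Int)) := by exact_mod_cast hl
        simp [he, hne]
  · have h1 : ¬ ((n : Int) ≤ (s.length : Int)) := by
      intro h; exact hn (by exact_mod_cast h)
    rw [if_neg h1]
    symm
    rw [List.map_eq_nil_iff, List.filter_eq_nil_iff]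
    intro q _ hq
    simp only [Bool.and_eq_true, decide_eq_true_eq] at hq
    have hlen : q.1.length = n := by exact_mod_cast hq.2
    have : s.length - q.1.length = 0 := by omega
    rw [this, List.drop_zero] at hq
    have := eq_of_beq hq.1
    have : s.length = q.1.length := by rw [this]
    omega

-- prefix/payload pair B's index stores for one enumerated bad word (proof-only helper)
def pvPair (p : Int × List Int) : List Int × (Int × Int) :=
  (PySem.List.slice p.2 none (some (-1)), (p.1, PySem.List.pyGetD p.2 (-1) 0))

-- ===== VERDICT (by name: the statement is the Claim_ definition above) =====
theorem calc_banned_bad_words_ids_spec : Claim_equal_calc_banned_bad_words_ids := by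
  intro prev bad _ _
  unfold Spec_calc_banned_bad_words_ids
  simp only [calc_banned_bad_words_ids, calc_banned_bad_words_ids_alt]
  rw [PySem.List.foldl_prod_mk
      (f := fun (d : PySem.Dict (List Int) (List (Int × Int))) (p : Int × List Int) =>
        d.modify (PySem.List.slice p.2 none (some (-1))) []
          (· ++ [(p.1, PySem.List.pyGetD p.2 (-1) 0)]))
      (g := fun (t : PySem.Set Int) (p : Int × List Int) =>
        PySem.Set.add t (PySem.List.len (PySem.List.slice p.2 none (some (-1)))))]
  simp only []
  set E := PySem.List.enumerate bad 0 with hE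
  -- the two outer loops are maps over the slices
  rw [PySem.List.foldl_append_singleton_eq_map, PySem.List.foldl_append_singleton_eq_map,
    List.nil_append, List.nil_append]
  -- the built index, resolved
  have htbl : E.foldl
      (fun (d : PySem.Dict (List Int) (List (Int × Int))) p =>
        d.modify (PySem.List.slice p.2 none (some (-1))) []
          (· ++ [(p.1, PySem.List.pyGetD p.2 (-1) 0)])) PySem.Dict.empty
      = (E.map pvPair).foldl (fun d q => d.modify q.1 [] (· ++ [q.2])) PySem.Dict.empty := by
    rw [List.foldl_map]
    simp only [pvPair]
  have hlen : E.foldl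
      (fun (t : PySem.Set Int) p =>
        PySem.Set.add t (PySem.List.len (PySem.List.slice p.2 none (some (-1))))) PySem.Set.empty
      = PySem.Set.ofList (E.map (fun p => PySem.List.len (PySem.List.slice p.2 none (some (-1))))) := by
    rw [← PySem.Set.update_map_eq_foldl_add]
    rfl
  rw [htbl, hlen]
  apply List.map_congr_left
  intro s _
  -- A's slice: flip the '= false' test and fold it into a filter
  have hA : (fun (bs : List Int) seq =>
        if pvTokensMatch s (PySem.List.slice seq none (some (-1))) = false then bs
        else bs ++ [PySem.List.pyGetD seq (-1) 0])
      = fun bs seq =>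
        if (s.drop (s.length - (PySem.List.slice seq none (some (-1))).length)
            == PySem.List.slice seq none (some (-1)))
        then bs ++ [PySem.List.pyGetD seq (-1) 0] else bs := by
    funext bs seq
    rw [pvTokensMatch_eq_drop]
    cases h : (s.drop (s.length - (PySem.List.slice seq none (some (-1))).length)
        == PySem.List.slice seq none (some (-1))) <;> simp
  rw [hA, PySem.List.foldl_append_if, List.nil_append]
  simp only [PySem.List.len_eq]
  -- B's slice: the hits loop is a flatMap over the distinct lengths
  have hB : (fun (h : List (Int × Int)) (L : Int) =>
        if L ≤ (s.length : Int) then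
          h ++ ((E.map pvPair).foldl (fun d q => d.modify q.1 [] (· ++ [q.2]))
              PySem.Dict.empty).getD (PySem.List.slice s (some ((s.length : Int) - L)) none) []
        else h)
      = fun h L => h ++ (if L ≤ (s.length : Int) then
          ((E.map pvPair).foldl (fun d q => d.modify q.1 [] (· ++ [q.2]))
              PySem.Dict.empty).getD (PySem.List.slice s (some ((s.length : Int) - L)) none) []
        else []) := by
    funext h L
    by_cases hc : L ≤ (s.length : Int) <;> simp [hc]
  rw [hB, PySem.List.foldl_append_eq_flatMap, List.nil_append]
  -- resolve each lookup group into a keyed filter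
  have hgrp : ∀ L ∈ PySem.Set.ofList
        (E.map (fun p => (((PySem.List.slice p.2 none (some (-1))).length : Nat) : Int))),
      (if L ≤ (s.length : Int) then
          ((E.map pvPair).foldl (fun d q => d.modify q.1 [] (· ++ [q.2]))
              PySem.Dict.empty).getD (PySem.List.slice s (some ((s.length : Int) - L)) none) []
        else [])
      = ((E.map pvPair).filter (fun q => (s.drop (s.length - q.1.length) == q.1)
          && decide ((q.1.length : Int) = L))).map (·.2) := by
    intro L hL
    rw [PySem.Set.mem_ofList, List.mem_map] at hL
    obtain ⟨p, _, hp⟩ := hL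
    have hLn : L = (((PySem.List.slice p.2 none (some (-1))).length : Nat) : Int) := hp.symm
    set n : Nat := (PySem.List.slice p.2 none (some (-1))).length with hn
    have step : (if L ≤ (s.length : Int) then
          ((E.map pvPair).foldl (fun d q => d.modify q.1 [] (· ++ [q.2]))
              PySem.Dict.empty).getD (PySem.List.slice s (some ((s.length : Int) - L)) none) []
        else [])
        = (if (n : Int) ≤ (s.length : Int) then
            ((E.map pvPair).filter (fun q => q.1 == s.drop (s.length - n))).map (·.2)
          else []) := by
      rw [hLn]
      by_cases hc : (n : Int) ≤ (s.length : Int)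
      · rw [if_pos hc, if_pos hc]
        have hcast : ((s.length : Int) - (n : Int)) = ((s.length - n : Nat) : Int) := by omega
        rw [hcast, PySem.List.slice_from_natCast,
          PySem.Dict.getD_foldl_modify_append, PySem.Dict.getD_empty, List.nil_append]
      · rw [if_neg hc, if_neg hc]
    rw [step, hLn]
    exact group_eq s (E.map pvPair) n
  rw [List.flatMap_congr hgrp]
  rw [← List.map_flatMap]
  -- the flattened groups are a permutation of the order-preserving filter
  have hperm : (((E.map pvPair).filter
        (fun q => s.drop (s.length - q.1.length) == q.1)).map (·.2)).Perm
      (((PySem.Set.ofList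
          (E.map (fun p => (((PySem.List.slice p.2 none (some (-1))).length : Nat) : Int)))).flatMap
        (fun L => (E.map pvPair).filter (fun q => (s.drop (s.length - q.1.length) == q.1)
          && decide ((q.1.length : Int) = L)))).map (·.2)) := by
    refine List.Perm.map _ (filter_perm_flatMap (E.map pvPair)
      (fun q => s.drop (s.length - q.1.length) == q.1)
      (fun q => ((q.1.length : Nat) : Int)) _ (PySem.Set.nodup_ofList _) ?_)
    intro q hq _
    rw [List.mem_map] at hq
    obtain ⟨e, he, rfl⟩ := hq
    rw [PySem.Set.mem_ofList, List.mem_map]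
    exact ⟨e, he, by simp [pvPair]⟩
  -- the filter is already in index order, so sorting the hits returns exactly it
  have hpw : (((E.map pvPair).filter
        (fun q => s.drop (s.length - q.1.length) == q.1)).map (·.2)).Pairwise
      (fun a b => a.1 < b.1) := by
    have hpwE : (E.map pvPair).Pairwise (fun a b => a.2.1 < b.2.1) := by
      refine List.Pairwise.map pvPair ?_ (PySem.List.pairwise_lt_enumerate bad 0)
      intro a b h
      simpa [pvPair] using h
    have hsub : ((E.map pvPair).filter
        (fun q => s.drop (s.length - q.1.length) == q.1)).Sublist (E.map pvPair) :=
      List.filter_sublist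
    have hpwM := hpwE.sublist hsub
    exact List.Pairwise.map (fun q : List Int × (Int × Int) => q.2) (fun a b h => h) hpwM
  rw [PySem.List.sorted_eq_of_perm_of_pairwise_lt _ _ _ hperm hpw]
  -- project away the prefixes and fold the enumerate back onto the bad-word list
  rw [List.map_map, List.filter_map, List.map_map]
  have := enumerate_filter_map_snd bad
    (fun seq => s.drop (s.length - (PySem.List.slice seq none (some (-1))).length)
      == PySem.List.slice seq none (some (-1)))
    (fun seq => PySem.List.pyGetD seq (-1) 0) 0
  rw [← this]
  simp [Function.comp_def, pvPair, hE]
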